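-- pv_equiv track=rewrite | github.com/GeNeLa/M2HO | script/processing/fileread.py | level_parsing
-- ===== SOURCE A (Python) =====
-- def level_parsing(text, sep):
--     level = 0
--     prev_length = len(text)
--     while True:
--         text = text.lstrip(sep).lstrip()
--         if len(text) == prev_length:
--             break
--         level += 1
--         prev_length = len(text)
--     return level, text
-- ===== SOURCE B (Python) =====
-- def level_parsing(text, sep):
--     n = len(text)
--     i = 0
--     level = 0
--     while True:
--         j = i
--         while j < n and text[j] in sep:
--             j += 1
--         while j < n and text[j].isspace():
--             j += 1
--         if j == i:
--             break
--         level += 1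
--         i = j
--     return level, text[i:]
-- ===== Notes on version B (the rewrite author's own statement) =====
-- stated objective: alternative
-- what changed: B replaces the repeated lstrip calls (each rebuilding a new string) by a single index-based scan that alternately advances past sep-runs and whitespace-runs, counting layers, and slices the remainder once at the end; this avoids A's O(n^2) worst-case string copying, though on random inputs CPython's C-level lstrip is not measurably beaten.
import Mathlib
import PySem

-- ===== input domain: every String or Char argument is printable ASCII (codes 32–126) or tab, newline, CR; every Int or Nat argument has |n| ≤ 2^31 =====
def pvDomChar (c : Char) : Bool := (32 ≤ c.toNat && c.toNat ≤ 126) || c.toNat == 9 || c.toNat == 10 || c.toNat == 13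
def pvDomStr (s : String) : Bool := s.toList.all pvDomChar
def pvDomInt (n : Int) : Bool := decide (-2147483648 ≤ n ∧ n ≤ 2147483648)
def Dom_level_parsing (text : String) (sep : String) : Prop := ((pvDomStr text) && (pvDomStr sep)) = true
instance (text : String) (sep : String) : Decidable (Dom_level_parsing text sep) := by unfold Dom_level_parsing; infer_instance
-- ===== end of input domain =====

-- B counts indentation layers with one index-based linear scan instead of A's repeated
-- string-copying lstrip loop (objective: alternative single-pass algorithm; no side effects).

-- ===== PORT A =====
-- text.lstrip(sep).lstrip(): drop leading chars contained in sep, then leading whitespace (exact on the ASCII domain)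
def pvStripOnceA (sep : List Char) (cs : List Char) : List Char :=
  (cs.dropWhile (fun c => sep.contains c)).dropWhile PySem.Chars.isspace

-- the while-True loop: prev_length is always the length text has at loop entry
def pvLoopA (sep : List Char) (level : Int) (text : List Char) : Int × List Char :=
  if (pvStripOnceA sep text).length = text.length then (level, pvStripOnceA sep text)
  else pvLoopA sep (level + 1) (pvStripOnceA sep text)
termination_by text.length
decreasing_by
  have h1 : (pvStripOnceA sep text).length ≤ text.length :=
    le_trans (List.length_dropWhile_le _ _) (List.length_dropWhile_le _ _)
  omega

def level_parsing (text : String) (sep : String) : Int × String :=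
  let r := pvLoopA sep.toList 0 text.toList
  (r.1, String.ofList r.2)

-- ===== PORT B =====
-- 'while j < n and p(text[j]): j += 1' — j < n = text.length keeps the access in range, so getD is exact
def pvRunEnd (t : List Char) (p : Char → Bool) (n : Nat) (j : Nat) : Nat :=
  if j < n then
    if p (t.getD j ' ') then pvRunEnd t p n (j + 1) else j
  else j
termination_by n - j
decreasing_by omega

-- lemmas the outer loop's termination cites
theorem pvRunEnd_ge (t : List Char) (p : Char → Bool) (n j : Nat) : j ≤ pvRunEnd t p n j := by
  fun_induction pvRunEnd t p n j with
  | case1 j h hp ih => omega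
  | case2 j h hp => omega
  | case3 j h => omega

theorem pvRunEnd_id (t : List Char) (p : Char → Bool) (n j : Nat) (h : ¬ j < n) :
    pvRunEnd t p n j = j := by
  unfold pvRunEnd; simp [h]

-- the outer while-True loop of B: returns (level, break position i)
def pvLoopB (sep : List Char) (t : List Char) (n : Nat) (level : Int) (i : Nat) : Int × Nat :=
  if pvRunEnd t PySem.Chars.isspace n (pvRunEnd t (fun c => sep.contains c) n i) = i then
    (level, i)
  else
    pvLoopB sep t n (level + 1)
      (pvRunEnd t PySem.Chars.isspace n (pvRunEnd t (fun c => sep.contains c) n i))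
termination_by n - i
decreasing_by
  rename_i h
  by_cases hi : i < n
  · have h1 := pvRunEnd_ge t (fun c => sep.contains c) n i
    have h2 := pvRunEnd_ge t PySem.Chars.isspace n (pvRunEnd t (fun c => sep.contains c) n i)
    omega
  · rw [pvRunEnd_id t _ n i hi, pvRunEnd_id t _ n i hi] at h
    exact absurd rfl h

def level_parsing_alt (text : String) (sep : String) : Int × String :=
  let t := text.toList
  let r := pvLoopB sep.toList t t.length 0 0
  -- text[i:] with 0 ≤ i is drop i (exact)
  (r.1, String.ofList (t.drop r.2))

-- ===== PRECONDITION & SPEC =====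
def Spec_level_parsing (text : String) (sep : String) (out : Int × String) : Prop := out = level_parsing_alt text sep
instance (text : String) (sep : String) (out : Int × String) : Decidable (Spec_level_parsing text sep out) := by unfold Spec_level_parsing; infer_instance

-- ===== CLAIM (what is proved, stated in full; the proofs are below) =====
def Claim_equal_level_parsing : Prop := ∀ (text : String) (sep : String), Dom_level_parsing text sep → Spec_level_parsing text sep (level_parsing text sep)

-- ===== LEMMAS AND PROOFS =====

theorem pvRunEnd_le (t : List Char) (p : Char → Bool) (n j : Nat) (h : j ≤ n) :
    pvRunEnd t p n j ≤ n := by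
  fun_induction pvRunEnd t p n j with
  | case1 j h1 hp ih => exact ih (by omega)
  | case2 j h1 hp => omega
  | case3 j h1 => omega

-- scanning an index past a run equals dropWhile on the corresponding suffix
theorem pvRunEnd_drop (t : List Char) (p : Char → Bool) (j : Nat) (h : j ≤ t.length) :
    t.drop (pvRunEnd t p t.length j) = (t.drop j).dropWhile p := by
  fun_induction pvRunEnd t p t.length j with
  | case1 j hlt hp ih =>
      have hd : t.drop j = t[j] :: t.drop (j + 1) := List.drop_eq_getElem_cons hlt
      have hg : t.getD j ' ' = t[j] := by simp [List.getD, List.getElem?_eq_getElem hlt]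
      rw [hd, List.dropWhile_cons]
      rw [hg] at hp
      simp [hp, ih (by omega)]
  | case2 j hlt hp =>
      have hd : t.drop j = t[j] :: t.drop (j + 1) := List.drop_eq_getElem_cons hlt
      have hg : t.getD j ' ' = t[j] := by simp [List.getD, List.getElem?_eq_getElem hlt]
      rw [hd, List.dropWhile_cons]
      rw [hg] at hp
      simp [hp, ← hd]
  | case3 j hlt =>
      have hj : j = t.length := by omega
      subst hj
      simp

-- the two loops agree: A's suffix is t.drop of B's break position, the levels coincide
theorem pvLoop_eq (sep t : List Char) (k : Nat) :
    ∀ (i : Nat), t.length - i ≤ k → i ≤ t.length → ∀ (level : Int),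
    pvLoopA sep level (t.drop i) =
      ((pvLoopB sep t t.length level i).1, t.drop (pvLoopB sep t t.length level i).2) := by
  induction k with
  | zero =>
      intro i hk hi level
      have hi' : i = t.length := by omega
      subst hi'
      rw [pvLoopA, pvLoopB, if_pos (by simp [pvStripOnceA]),
        if_pos (by rw [pvRunEnd_id t _ t.length t.length (by omega),
                       pvRunEnd_id t _ t.length t.length (by omega)])]
      simp [pvStripOnceA]
  | succ k ih =>
      intro i hk hi level
      have hj1ge := pvRunEnd_ge t (fun c => sep.contains c) t.length i
      have hj1le := pvRunEnd_le t (fun c => sep.contains c) t.length i hi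
      have hjge := pvRunEnd_ge t PySem.Chars.isspace t.length
        (pvRunEnd t (fun c => sep.contains c) t.length i)
      have hjle := pvRunEnd_le t PySem.Chars.isspace t.length
        (pvRunEnd t (fun c => sep.contains c) t.length i) hj1le
      have hstrip : pvStripOnceA sep (t.drop i) =
          t.drop (pvRunEnd t PySem.Chars.isspace t.length
            (pvRunEnd t (fun c => sep.contains c) t.length i)) := by
        unfold pvStripOnceA
        rw [pvRunEnd_drop t PySem.Chars.isspace _ hj1le, pvRunEnd_drop t _ i hi]
      rw [pvLoopA, pvLoopB]
      by_cases hcond : pvRunEnd t PySem.Chars.isspace t.length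
          (pvRunEnd t (fun c => sep.contains c) t.length i) = i
      · have hlen : (pvStripOnceA sep (t.drop i)).length = (t.drop i).length := by
          rw [hstrip, hcond]
        rw [if_pos hlen, if_pos hcond, hstrip, hcond]
      · have hlen : ¬ (pvStripOnceA sep (t.drop i)).length = (t.drop i).length := by
          rw [hstrip]
          simp only [List.length_drop]
          omega
        rw [if_neg hlen, if_neg hcond, hstrip]
        exact ih _ (by omega) (by omega) (level + 1)

-- ===== VERDICT (by name: the statement is the Claim_ definition above) =====
theorem level_parsing_spec : Claim_equal_level_parsing := by
  intro text sep _
  unfold Spec_level_parsing level_parsing level_parsing_alt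
  have h := pvLoop_eq sep.toList text.toList text.toList.length 0 (by omega) (by omega) 0
  simp only [List.drop_zero] at h
  simp [h]
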